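-- pv_equiv track=rewrite | github.com/xuzhougeng/HCR_designer | scripts/tcr.py | has_dimer_issues
-- ===== SOURCE A (Python) =====
-- def is_complementary(seq1, seq2):
--     """检查两个序列是否互补"""
--     if len(seq1) != len(seq2):
--         return False
--     pairs = {'A': 'T', 'T': 'A', 'C': 'G', 'G': 'C'}
--     for b1, b2 in zip(seq1, seq2):
--         if b2 != pairs.get(b1):
--             return False
--     return True
--
-- def check_complementarity(primer1, primer2, min_complementary_length=4):
--     """检查两个引物序列之间的互补性"""
--     len1, len2 = len(primer1), len(primer2)
--
--     # 检查局部互补性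
--     for i in range(len1 - min_complementary_length + 1):
--         for j in range(len2 - min_complementary_length + 1):
--             if is_complementary(primer1[i:i+min_complementary_length],
--                               primer2[j:j+min_complementary_length][::-1]):
--                 return {'has_complementarity': True, 'end_complementarity': False}
--
--     # 检查3'端互补性
--     end_length = min(5, min_complementary_length)
--     end_complementarity = is_complementary(primer1[-end_length:], primer2[-end_length:][::-1])
--
--     return {
--         'has_complementarity': False,
--         'end_complementarity': end_complementarity
--     }
--
-- def has_dimer_issues(primers, min_complementary_length=4):
--     """
--     检查一组引物是否存在二聚体问题
--
--     Parameters: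
--     -----------
--     primers : list
--         引物序列列表
--     min_complementary_length : int, optional
--         判定为互补的最小连续碱基长度 (default: 4)
--
--     Returns:
--     --------
--     bool: 如果存在二聚体问题则返回True，否则返回False
--
--     Example:
--         >>> has_dimer_issues(["ATGC", "GCAT"])
--         True
--     """
--     if not primers:
--         return False
--
--     # 检查所有可能的引物对
--     for i in range(len(primers)):
--         # 检查自身互补
--         if len(primers[i]) >= min_complementary_length * 2:
--             result = check_complementarity(primers[i][:len(primers[i])//2],
--                                         primers[i][len(primers[i])//2:],
--                                         min_complementary_length)
--             if result['has_complementarity']: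
--                 return True
--
--         # 检查与其他引物的互补
--         for j in range(i + 1, len(primers)):
--             result = check_complementarity(primers[i], primers[j], min_complementary_length)
--             if result['has_complementarity']:
--                 return True
--
--     return False
-- ===== SOURCE B (Python) =====
-- def has_dimer_issues(primers, min_complementary_length=4):
--     """Single-pass k-mer index: a cross dimer exists iff some primer contains
--     the reverse-complement of a k-mer of an earlier primer; self dimers are
--     checked half against half.  No pairwise window-by-window scan."""
--     m = min_complementary_length
--     if m <= 0:
--         # an empty window is trivially complementary, so any primer dimerizes
--         return len(primers) > 0
--     comp = {'A': 'T', 'T': 'A', 'C': 'G', 'G': 'C'}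
--
--     def kmers(s):
--         ks = set()
--         for i in range(len(s) - m + 1):
--             w = s[i:i + m]
--             if all(b in comp for b in w):
--                 ks.add(w)
--         return ks
--
--     def rc(w):
--         return ''.join(comp[b] for b in reversed(w))
--
--     seen = set()
--     for p in primers:
--         ks = kmers(p)
--         if ks & seen:
--             return True
--         if len(p) >= 2 * m:
--             h = len(p) // 2
--             back = kmers(p[h:])
--             if any(rc(w) in back for w in kmers(p[:h])):
--                 return True
--         seen |= {rc(w) for w in ks}
--     return False
-- ===== Notes on version B (the rewrite author's own statement) =====
-- stated objective: faster
-- what changed: Replaces the all-pairs window-by-window complementarity scan with a single pass that collects each primer's ACGT k-mers into a set and tests reverse-complement membership against the accumulated k-mers of earlier primers (self dimers: front-half k-mer set against back-half k-mer set).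
import Mathlib
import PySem

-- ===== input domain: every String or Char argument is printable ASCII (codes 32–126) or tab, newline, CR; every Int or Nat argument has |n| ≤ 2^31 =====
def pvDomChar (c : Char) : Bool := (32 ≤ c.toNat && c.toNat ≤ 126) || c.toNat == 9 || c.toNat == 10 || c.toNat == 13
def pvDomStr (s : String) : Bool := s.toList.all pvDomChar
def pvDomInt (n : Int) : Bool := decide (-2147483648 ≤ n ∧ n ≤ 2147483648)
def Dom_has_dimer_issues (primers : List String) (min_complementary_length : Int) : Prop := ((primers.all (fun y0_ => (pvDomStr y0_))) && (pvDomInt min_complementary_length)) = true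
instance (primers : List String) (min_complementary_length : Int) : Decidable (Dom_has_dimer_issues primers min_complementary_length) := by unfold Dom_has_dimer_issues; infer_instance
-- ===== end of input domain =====

-- B replaces A's all-pairs window-by-window scan with one pass over per-primer ACGT k-mer
-- sets and reverse-complement membership tests (measured faster; same return value).

-- ===== PORT A =====
-- pairs = {'A': 'T', 'T': 'A', 'C': 'G', 'G': 'C'}
def pv_pairs : PySem.Dict Char Char := PySem.Dict.ofList [('A','T'),('T','A'),('C','G'),('G','C')]

def is_complementary (seq1 seq2 : String) : Bool :=
  if PySem.Str.len seq1 != PySem.Str.len seq2 then false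
  else (seq1.toList.zip seq2.toList).all (fun bp => pv_pairs.get? bp.1 == some bp.2)

-- 'for i in range(i0, i0+fuel): if f(i): return True' / 'return False' early-exit loop
def pv_anyRange (f : Int → Bool) : Nat → Int → Bool
  | 0, _ => false
  | n+1, i => if f i then true else pv_anyRange f n (i+1)

-- s[::-1]  (step -1 ≠ 0, so slice? never returns none)
def pv_rev (s : String) : String := (PySem.Str.slice? s none none (-1)).getD ""

-- the Python returns a dict with the two fixed keys 'has_complementarity', 'end_complementarity';
-- ported as the pair (has_complementarity, end_complementarity)
def check_complementarity (primer1 primer2 : String) (min_complementary_length : Int) : Bool × Bool :=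
  let len1 := PySem.Str.len primer1
  let len2 := PySem.Str.len primer2
  let has :=
    pv_anyRange (fun i =>
      pv_anyRange (fun j =>
        is_complementary (PySem.Str.slice primer1 (some i) (some (i + min_complementary_length)))
          (pv_rev (PySem.Str.slice primer2 (some j) (some (j + min_complementary_length)))))
        (len2 - min_complementary_length + 1).toNat 0)
      (len1 - min_complementary_length + 1).toNat 0
  if has then (true, false)
  else
    let end_length := min 5 min_complementary_length
    let endc := is_complementary (PySem.Str.slice primer1 (some (-end_length)) none)
                  (pv_rev (PySem.Str.slice primer2 (some (-end_length)) none))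
    (false, endc)

def has_dimer_issues (primers : List String) (min_complementary_length : Int) : Bool :=
  if primers == [] then false
  else
    pv_anyRange (fun i =>
      let pi := PySem.List.pyGetD primers i ""   -- primers[i], i always in range
      (if decide (PySem.Str.len pi ≥ min_complementary_length * 2) then
        (check_complementarity
            (PySem.Str.slice pi none (some (PySem.Int.floordiv (PySem.Str.len pi) 2)))
            (PySem.Str.slice pi (some (PySem.Int.floordiv (PySem.Str.len pi) 2)) none)
            min_complementary_length).1
       else false)
      ||
      pv_anyRange (fun j =>
          (check_complementarity pi (PySem.List.pyGetD primers j "") min_complementary_length).1)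
        (PySem.List.len primers - (i+1)).toNat (i+1))
      (PySem.List.len primers).toNat 0

-- ===== PORT B =====
-- comp = {'A': 'T', 'T': 'A', 'C': 'G', 'G': 'C'}
def pv_comp : PySem.Dict Char Char := PySem.Dict.ofList [('A','T'),('T','A'),('C','G'),('G','C')]

-- kmers(s): the set of ACGT-only windows of length m
def pv_kmers (m : Int) (s : String) : PySem.Set String :=
  (PySem.List.pyRange 0 (PySem.Str.len s - m + 1) 1).foldl
    (fun ks i =>
      let w := PySem.Str.slice s (some i) (some (i + m))
      if w.toList.all (fun b => pv_comp.contains b) then PySem.Set.add ks w else ks)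
    PySem.Set.empty

-- rc(w) = ''.join(comp[b] for b in reversed(w)); comp[b] is only ever applied to ACGT chars
def pv_rc (w : String) : String :=
  String.ofList (w.toList.reverse.map (fun b => pv_comp.getD b '?'))

-- the 'for p in primers' loop, carrying the accumulated reverse-complement set 'seen'
def pv_scan (m : Int) : List String → PySem.Set String → Bool
  | [], _ => false
  | p :: rest, seen =>
    let ks := pv_kmers m p
    if !(PySem.Set.inter ks seen).isEmpty then true
    else if decide (PySem.Str.len p ≥ 2 * m) &&
            (let h := PySem.Int.floordiv (PySem.Str.len p) 2
             let back := pv_kmers m (PySem.Str.slice p (some h) none)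
             (pv_kmers m (PySem.Str.slice p none (some h))).any
               (fun w => PySem.Set.contains back (pv_rc w)))
         then true
    else pv_scan m rest (PySem.Set.union seen (ks.map pv_rc))

def has_dimer_issues_alt (primers : List String) (min_complementary_length : Int) : Bool :=
  if min_complementary_length ≤ 0 then decide (0 < PySem.List.len primers)
  else pv_scan min_complementary_length primers PySem.Set.empty

-- ===== PRECONDITION & SPEC =====
def Spec_has_dimer_issues (primers : List String) (min_complementary_length : Int) (out : Bool) : Prop := out = has_dimer_issues_alt primers min_complementary_length
instance (primers : List String) (min_complementary_length : Int) (out : Bool) : Decidable (Spec_has_dimer_issues primers min_complementary_length out) := by unfold Spec_has_dimer_issues; infer_instance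

-- ===== CLAIM (what is proved, stated in full; the proofs are below) =====
def Claim_equal_has_dimer_issues : Prop := ∀ (primers : List String) (min_complementary_length : Int), Dom_has_dimer_issues primers min_complementary_length → Spec_has_dimer_issues primers min_complementary_length (has_dimer_issues primers min_complementary_length)

-- ===== LEMMAS AND PROOFS =====

-- ---- facts about the literal base-pair dicts ----
lemma pv_comp_eq_pairs : pv_comp = pv_pairs := rfl

lemma pv_get?_pairs (c : Char) :
    pv_pairs.get? c = if c = 'A' then some 'T' else if c = 'T' then some 'A' else if c = 'C' then some 'G' else if c = 'G' then some 'C' else none := by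
  by_cases hA : c = 'A'; · subst hA; decide
  by_cases hT : c = 'T'; · subst hT; decide
  by_cases hC : c = 'C'; · subst hC; decide
  by_cases hG : c = 'G'; · subst hG; decide
  have eA : ('A' == c) = false := beq_eq_false_iff_ne.mpr (Ne.symm hA)
  have eT : ('T' == c) = false := beq_eq_false_iff_ne.mpr (Ne.symm hT)
  have eC : ('C' == c) = false := beq_eq_false_iff_ne.mpr (Ne.symm hC)
  have eG : ('G' == c) = false := beq_eq_false_iff_ne.mpr (Ne.symm hG)
  rw [if_neg hA, if_neg hT, if_neg hC, if_neg hG]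
  simp only [pv_pairs, PySem.Dict.ofList, PySem.Dict.update, PySem.Dict.insert, PySem.Dict.empty,
    PySem.Dict.get?, PySem.Dict.contains, List.foldl]
  simp [List.find?, eA, eT, eC, eG]

-- ACGT test and the complement map, as plain char functions
def pvACGT (c : Char) : Bool := c == 'A' || c == 'T' || c == 'C' || c == 'G'
def pvCC (c : Char) : Char := if c = 'A' then 'T' else if c = 'T' then 'A' else if c = 'C' then 'G' else if c = 'G' then 'C' else '?'

lemma pv_contains_pairs (c : Char) : pv_pairs.contains c = pvACGT c := by
  by_cases hA : c = 'A'; · subst hA; decide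
  by_cases hT : c = 'T'; · subst hT; decide
  by_cases hC : c = 'C'; · subst hC; decide
  by_cases hG : c = 'G'; · subst hG; decide
  have eA : ('A' == c) = false := beq_eq_false_iff_ne.mpr (Ne.symm hA)
  have eT : ('T' == c) = false := beq_eq_false_iff_ne.mpr (Ne.symm hT)
  have eC : ('C' == c) = false := beq_eq_false_iff_ne.mpr (Ne.symm hC)
  have eG : ('G' == c) = false := beq_eq_false_iff_ne.mpr (Ne.symm hG)
  have hr : pvACGT c = false := by simp [pvACGT, hA, hT, hC, hG]
  rw [hr]
  simp only [pv_pairs, PySem.Dict.ofList, PySem.Dict.update, PySem.Dict.insert, PySem.Dict.empty,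
    PySem.Dict.contains, List.foldl]
  simp [List.any, eA, eT, eC, eG]

lemma pv_getD_pairs (c : Char) : pv_pairs.getD c '?' = pvCC c := by
  rw [PySem.Dict.getD_eq_get?_getD, pv_get?_pairs, pvCC]
  split_ifs <;> rfl

lemma pvACGT_pvCC (c : Char) (h : pvACGT c = true) : pvACGT (pvCC c) = true := by
  simp only [pvACGT, Bool.or_eq_true, beq_iff_eq] at h
  rcases h with ((rfl|rfl)|rfl)|rfl <;> decide

-- key pointwise fact for is_complementary
lemma pv_get?_eq_some (c d : Char) :
    (pv_pairs.get? c == some d) = (pvACGT c && (d == pvCC c)) := by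
  rw [pv_get?_pairs]
  by_cases hA : c = 'A'; · subst hA; simp [pvACGT, pvCC, eq_comm]
  by_cases hT : c = 'T'; · subst hT; simp [pvACGT, pvCC, eq_comm]
  by_cases hC : c = 'C'; · subst hC; simp [pvACGT, pvCC, eq_comm]
  by_cases hG : c = 'G'; · subst hG; simp [pvACGT, pvCC, eq_comm]
  simp [hA, hT, hC, hG, pvACGT, pvCC]

-- ---- is_complementary ----
lemma pv_zip_all (a b : List Char) :
    ((a.length = b.length) ∧ (a.zip b).all (fun bp => pv_pairs.get? bp.1 == some bp.2) = true)
      ↔ (a.all pvACGT = true ∧ b = a.map pvCC) := by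
  induction a generalizing b with
  | nil => cases b <;> simp
  | cons x xs ih =>
    cases b with
    | nil => simp
    | cons y ys =>
      simp only [List.length_cons, List.zip_cons_cons, List.all_cons, List.map_cons, Bool.and_eq_true]
      rw [pv_get?_eq_some]
      constructor
      · rintro ⟨hl, ⟨h1, h2⟩⟩
        simp only [Bool.and_eq_true, beq_iff_eq] at h1
        have := (ih ys).mp ⟨by omega, h2⟩
        exact ⟨⟨h1.1, this.1⟩, by simp [h1.2, this.2]⟩
      · rintro ⟨⟨h1, h2⟩, h3⟩
        injection h3 with hy hys
        have := (ih ys).mpr ⟨h2, hys⟩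
        refine ⟨by omega, ⟨by simp [h1, hy], this.2⟩⟩

lemma pv_isComp_iff (s t : String) :
    is_complementary s t = true ↔ (s.toList.all pvACGT = true ∧ t.toList = s.toList.map pvCC) := by
  rw [is_complementary]
  rw [← pv_zip_all s.toList t.toList]
  by_cases h : PySem.Str.len s = PySem.Str.len t
  · simp only [h, bne_self_eq_false, Bool.false_eq_true, if_false]
    simp only [PySem.Str.len_eq] at h
    constructor
    · exact fun hz => ⟨by exact_mod_cast h, hz⟩
    · exact fun hz => hz.2
  · have : (PySem.Str.len s != PySem.Str.len t) = true := bne_iff_ne.mpr h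
    simp only [this, if_true]
    simp only [PySem.Str.len_eq] at h
    constructor
    · intro hf; exact absurd hf (by simp)
    · rintro ⟨hl, _⟩; exact absurd (by exact_mod_cast hl) h

-- ---- pv_rev / pv_rc ----
lemma pv_rev_toList (s : String) : (pv_rev s).toList = s.toList.reverse := by
  rw [pv_rev, PySem.Str.slice?_none_none_neg_one]
  simp

lemma pv_rc_toList (w : String) : (pv_rc w).toList = w.toList.reverse.map pvCC := by
  rw [pv_rc]
  simp [pv_comp_eq_pairs, pv_getD_pairs]

-- is_complementary x (rev y) means exactly: x is ACGT and y = rc(x)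
lemma pv_isComp_rev_iff (x y : String) :
    is_complementary x (pv_rev y) = true ↔ (x.toList.all pvACGT = true ∧ y = pv_rc x) := by
  rw [pv_isComp_iff, pv_rev_toList]
  constructor
  · rintro ⟨h1, h2⟩
    refine ⟨h1, ?_⟩
    have : y.toList = (pv_rc x).toList := by
      rw [pv_rc_toList, List.map_reverse, ← h2, List.reverse_reverse]
    exact String.toList_inj.mp this
  · rintro ⟨h1, rfl⟩
    refine ⟨h1, ?_⟩
    rw [pv_rc_toList]
    simp [List.map_reverse]

-- ---- the early-exit range loop ----
lemma pv_anyRange_iff (f : Int → Bool) (n : Nat) (i0 : Int) :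
    pv_anyRange f n i0 = true ↔ ∃ k : Nat, k < n ∧ f (i0 + k) = true := by
  induction n generalizing i0 with
  | zero => simp [pv_anyRange]
  | succ n ih =>
    rw [pv_anyRange]
    by_cases h : f i0 = true
    · simp only [h, if_true, true_iff]
      exact ⟨0, by omega, by simpa using h⟩
    · rw [if_neg h, ih]
      constructor
      · rintro ⟨k, hk, hf⟩
        refine ⟨k+1, by omega, ?_⟩
        have e : i0 + ((k:Int) + 1) = i0 + 1 + (k:Int) := by ring
        push_cast
        rw [e]; exact hf
      · rintro ⟨k, hk, hf⟩
        cases k with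
        | zero => simp at hf; exact absurd hf h
        | succ k =>
          refine ⟨k, by omega, ?_⟩
          have e : i0 + 1 + (k:Int) = i0 + ((k:Int) + 1) := by ring
          rw [e]
          push_cast at hf
          exact hf

lemma pv_acgt_eq_contains (w : String) :
    (w.toList.all (fun b => pv_comp.contains b)) = w.toList.all pvACGT := by
  simp [pv_comp_eq_pairs, pv_contains_pairs]

-- ---- kmers membership ----
lemma pv_mem_kmers (m : Int) (s : String) (w : String) :
    w ∈ pv_kmers m s ↔ ∃ i : Int, (0 ≤ i ∧ i < PySem.Str.len s - m + 1) ∧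
      (PySem.Str.slice s (some i) (some (i + m))).toList.all pvACGT = true ∧
      w = PySem.Str.slice s (some i) (some (i + m)) := by
  have he : pv_kmers m s =
      ((PySem.List.pyRange 0 (PySem.Str.len s - m + 1) 1).filter
        (fun i => (PySem.Str.slice s (some i) (some (i + m))).toList.all (fun b => pv_comp.contains b))).foldl
        (fun ks i => PySem.Set.add ks (PySem.Str.slice s (some i) (some (i + m)))) PySem.Set.empty := by
    rw [pv_kmers]
    exact PySem.List.foldl_if_eq_foldl_filter
      (p := fun i => (PySem.Str.slice s (some i) (some (i + m))).toList.all (fun b => pv_comp.contains b))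
      (f := fun ks i => PySem.Set.add ks (PySem.Str.slice s (some i) (some (i + m))))
      (l := PySem.List.pyRange 0 (PySem.Str.len s - m + 1) 1)
      (init := PySem.Set.empty)
  rw [he, PySem.Set.mem_foldl_add]
  simp only [PySem.Set.empty, List.not_mem_nil, false_or, List.mem_filter, PySem.List.mem_pyRange_one]
  constructor
  · rintro ⟨i, ⟨⟨h1, h2⟩, h3⟩, rfl⟩
    exact ⟨i, ⟨h1, h2⟩, by rw [← pv_acgt_eq_contains]; exact h3, rfl⟩
  · rintro ⟨i, ⟨h1, h2⟩, h3, rfl⟩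
    exact ⟨i, ⟨⟨h1, h2⟩, by rw [pv_acgt_eq_contains]; exact h3⟩, rfl⟩

-- window of an in-range i has full length m and pins slices; cross characterization
def pvCross (m : Int) (a b : String) : Prop := ∃ x, x ∈ pv_kmers m a ∧ pv_rc x ∈ pv_kmers m b

lemma pv_check_fst (a b : String) (m : Int) :
    (check_complementarity a b m).1 =
      pv_anyRange (fun i =>
        pv_anyRange (fun j =>
          is_complementary (PySem.Str.slice a (some i) (some (i + m)))
            (pv_rev (PySem.Str.slice b (some j) (some (j + m)))))
          (PySem.Str.len b - m + 1).toNat 0)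
        (PySem.Str.len a - m + 1).toNat 0 := by
  rw [check_complementarity]
  set h := pv_anyRange _ _ _
  by_cases hh : h = true <;> simp [hh]

lemma pv_rc_acgt (x : String) (h : x.toList.all pvACGT = true) :
    (pv_rc x).toList.all pvACGT = true := by
  rw [pv_rc_toList]
  simp only [List.all_map, List.all_reverse, List.all_eq_true] at h ⊢
  exact fun c hc => pvACGT_pvCC c (h c hc)

lemma pv_crossA_iff (a b : String) (m : Int) :
    (check_complementarity a b m).1 = true ↔ pvCross m a b := by
  rw [pv_check_fst, pv_anyRange_iff]
  simp only [pv_anyRange_iff, zero_add, pv_isComp_rev_iff]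
  constructor
  · rintro ⟨k, hk, k2, hk2, hacgt, heq⟩
    refine ⟨PySem.Str.slice a (some (k:Int)) (some ((k:Int) + m)), ?_, ?_⟩
    · rw [pv_mem_kmers]
      exact ⟨(k:Int), ⟨by omega, by omega⟩, hacgt, rfl⟩
    · rw [pv_mem_kmers]
      refine ⟨(k2:Int), ⟨by omega, by omega⟩, ?_, by rw [heq]⟩
      rw [heq]
      exact pv_rc_acgt _ hacgt
  · rintro ⟨x, hxa, hxb⟩
    rw [pv_mem_kmers] at hxa hxb
    obtain ⟨i, ⟨hi0, hi1⟩, hacgt, rfl⟩ := hxa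
    obtain ⟨j, ⟨hj0, hj1⟩, _, hrc⟩ := hxb
    refine ⟨i.toNat, by omega, j.toNat, by omega, ?_, ?_⟩
    · rwa [Int.toNat_of_nonneg hi0]
    · rw [Int.toNat_of_nonneg hi0, Int.toNat_of_nonneg hj0]
      exact hrc.symm

-- ---- B's scan ----
def pvSelf (m : Int) (p : String) : Prop :=
  2 * m ≤ PySem.Str.len p ∧
  pvCross m (PySem.Str.slice p none (some (PySem.Int.floordiv (PySem.Str.len p) 2)))
            (PySem.Str.slice p (some (PySem.Int.floordiv (PySem.Str.len p) 2)) none)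

lemma pv_scan_iff (m : Int) (ps : List String) (seen : PySem.Set String) :
    pv_scan m ps seen = true ↔
      ∃ j, j < ps.length ∧
        ((∃ w ∈ pv_kmers m (ps.getD j ""), w ∈ seen) ∨ pvSelf m (ps.getD j "") ∨
          ∃ i, i < j ∧ pvCross m (ps.getD i "") (ps.getD j "")) := by
  induction ps generalizing seen with
  | nil => simp [pv_scan]
  | cons p rest ih =>
    have hc1 : ((!(PySem.Set.inter (pv_kmers m p) seen).isEmpty) = true)
        ↔ ∃ w ∈ pv_kmers m p, w ∈ seen := by
      rw [Bool.not_eq_eq_eq_not, Bool.not_true, List.isEmpty_eq_false_iff_exists_mem]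
      constructor
      · rintro ⟨w, hw⟩; exact ⟨w, (PySem.Set.mem_inter _ _ _).mp hw⟩
      · rintro ⟨w, h1, h2⟩; exact ⟨w, (PySem.Set.mem_inter _ _ _).mpr ⟨h1, h2⟩⟩
    have hc2 : ((decide (PySem.Str.len p ≥ 2 * m) &&
            (let h := PySem.Int.floordiv (PySem.Str.len p) 2
             let back := pv_kmers m (PySem.Str.slice p (some h) none)
             (pv_kmers m (PySem.Str.slice p none (some h))).any
               (fun w => PySem.Set.contains back (pv_rc w)))) = true)
        ↔ pvSelf m p := by
      rw [pvSelf, Bool.and_eq_true, decide_eq_true_iff]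
      simp only [List.any_eq_true, PySem.Set.contains_iff]
      rfl
    rw [pv_scan]
    split_ifs with h1 h2
    · simp only [true_iff]
      exact ⟨0, by simp, Or.inl (by simpa using hc1.mp h1)⟩
    · simp only [true_iff]
      exact ⟨0, by simp, Or.inr (Or.inl (by simpa using hc2.mp h2))⟩
    · rw [ih]
      constructor
      · rintro ⟨j, hj, hcase⟩
        refine ⟨j + 1, by simpa using Nat.succ_lt_succ hj, ?_⟩
        simp only [List.getD_cons_succ]
        rcases hcase with ⟨w, hwk, hwseen⟩ | hs | ⟨i, hij, hcr⟩
        · rcases (PySem.Set.mem_union _ _ _).mp hwseen with hold | hnew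
          · exact Or.inl ⟨w, hwk, hold⟩
          · obtain ⟨x, hx, rfl⟩ := List.mem_map.mp hnew
            exact Or.inr (Or.inr ⟨0, by omega, ⟨x, hx, hwk⟩⟩)
        · exact Or.inr (Or.inl hs)
        · exact Or.inr (Or.inr ⟨i + 1, by omega, by simpa using hcr⟩)
      · rintro ⟨j, hj, hcase⟩
        cases j with
        | zero =>
          simp only [List.getD_cons_zero] at hcase
          rcases hcase with hw | hs | ⟨i, hi, _⟩
          · exact absurd (hc1.mpr hw) h1
          · exact absurd (hc2.mpr hs) h2
          · omega
        | succ j =>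
          refine ⟨j, by simpa using hj, ?_⟩
          simp only [List.getD_cons_succ] at hcase
          rcases hcase with ⟨w, hwk, hwseen⟩ | hs | ⟨i, hij, hcr⟩
          · exact Or.inl ⟨w, hwk, (PySem.Set.mem_union _ _ _).mpr (Or.inl hwseen)⟩
          · exact Or.inr (Or.inl hs)
          · cases i with
            | zero =>
              simp only [List.getD_cons_zero] at hcr
              obtain ⟨x, hxp, hxr⟩ := hcr
              exact Or.inl ⟨pv_rc x, hxr, (PySem.Set.mem_union _ _ _).mpr (Or.inr (List.mem_map_of_mem hxp))⟩
            | succ i =>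
              exact Or.inr (Or.inr ⟨i, by omega, by simpa using hcr⟩)

-- ---- A's outer loop ----
lemma pv_A_iff (ps : List String) (m : Int) :
    has_dimer_issues ps m = true ↔
      ∃ i, i < ps.length ∧
        ((m * 2 ≤ PySem.Str.len (ps.getD i "") ∧
            (check_complementarity
              (PySem.Str.slice (ps.getD i "") none (some (PySem.Int.floordiv (PySem.Str.len (ps.getD i "")) 2)))
              (PySem.Str.slice (ps.getD i "") (some (PySem.Int.floordiv (PySem.Str.len (ps.getD i "")) 2)) none)
              m).1 = true) ∨
          ∃ j, i < j ∧ j < ps.length ∧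
            (check_complementarity (ps.getD i "") (ps.getD j "") m).1 = true) := by
  rw [has_dimer_issues]
  by_cases hps : ps = []
  · subst hps; simp
  · rw [if_neg (by simpa using hps)]
    rw [pv_anyRange_iff]
    simp only [pv_anyRange_iff, zero_add, PySem.List.len_eq, PySem.List.pyGetD_natCast,
      Int.toNat_natCast, Bool.or_eq_true]
    constructor
    · rintro ⟨k, hk, hbody⟩
      refine ⟨k, hk, ?_⟩
      rcases hbody with hself | ⟨k2, hk2, hc⟩
      · left
        split_ifs at hself with hgate
        · exact ⟨by simpa [ge_iff_le] using of_decide_eq_true hgate, hself⟩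
      · right
        refine ⟨k + 1 + k2, by omega, by omega, ?_⟩
        have e : (k : Int) + 1 + (k2 : Int) = ((k + 1 + k2 : Nat) : Int) := by push_cast; ring
        rw [e, PySem.List.pyGetD_natCast] at hc
        exact hc
    · rintro ⟨i, hi, ⟨hgate, hch⟩ | ⟨j, hij, hj, hc⟩⟩
      · refine ⟨i, hi, Or.inl ?_⟩
        rw [if_pos (decide_eq_true_iff.mpr (by exact_mod_cast hgate))]
        exact hch
      · refine ⟨i, by omega, Or.inr ⟨j - (i + 1), by omega, ?_⟩⟩
        have e : (i : Int) + 1 + ((j - (i + 1) : Nat) : Int) = ((j : Nat) : Int) := by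
          push_cast [Nat.cast_sub (by omega : i + 1 ≤ j)]; ring
        rw [e, PySem.List.pyGetD_natCast]
        exact hc

-- ---- degenerate m ≤ 0 ----
lemma pv_isComp_nil (s t : String) (hs : s.toList = []) (ht : t.toList = []) :
    is_complementary s t = true := by
  rw [is_complementary]
  simp [PySem.Str.len_eq, hs, ht]

lemma pv_slice_nonpos_nil (s : String) (m : Int) (hm : m ≤ 0) :
    (PySem.Str.slice s (some (0 + ((-m).toNat : Int))) (some (0 + ((-m).toNat : Int) + m))).toList = [] := by
  have e : (0 + ((-m).toNat : Int)) = -m := by omega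
  rw [e]
  have e2 : -m + m = (0 : Int) := by ring
  rw [e2]
  simp only [PySem.Str.toList_slice, PySem.Chars.slice_eq_listSlice]
  rw [PySem.List.slice_toNat _ (by omega) (by omega)]
  simp

lemma pv_check_has_of_nonpos (a b : String) (m : Int) (hm : m ≤ 0) :
    (check_complementarity a b m).1 = true := by
  rw [pv_check_fst, pv_anyRange_iff]
  have hla : (0 : Int) ≤ PySem.Str.len a := by simp [PySem.Str.len_eq]
  have hlb : (0 : Int) ≤ PySem.Str.len b := by simp [PySem.Str.len_eq]
  refine ⟨(-m).toNat, by omega, ?_⟩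
  rw [pv_anyRange_iff]
  refine ⟨(-m).toNat, by omega, ?_⟩
  apply pv_isComp_nil
  · exact pv_slice_nonpos_nil a m hm
  · rw [pv_rev_toList, pv_slice_nonpos_nil b m hm, List.reverse_nil]

lemma pv_A_nonpos (ps : List String) (m : Int) (hm : m ≤ 0) :
    has_dimer_issues ps m = decide (0 < PySem.List.len ps) := by
  by_cases hps : ps = []
  · subst hps; simp [has_dimer_issues, PySem.List.len_eq]
  · have hlen : 0 < ps.length := List.length_pos_iff.mpr hps
    have hr : decide (0 < PySem.List.len ps) = true := by
      simp only [PySem.List.len_eq, decide_eq_true_iff]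
      exact_mod_cast hlen
    rw [hr, has_dimer_issues, if_neg (by simpa using hps), pv_anyRange_iff]
    refine ⟨0, by simp [PySem.List.len_eq]; omega, ?_⟩
    rw [Bool.or_eq_true]
    left
    rw [if_pos ?hg]
    case hg =>
      rw [decide_eq_true_iff]
      have : (0:Int) ≤ PySem.Str.len (PySem.List.pyGetD ps (0 + ((0:Nat):Int)) "") := by
        simp [PySem.Str.len_eq]
      omega
    exact pv_check_has_of_nonpos _ _ m hm



lemma pv_main (ps : List String) (m : Int) :
    has_dimer_issues ps m = has_dimer_issues_alt ps m := by
  rw [has_dimer_issues_alt]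
  by_cases hm : m ≤ 0
  · rw [if_pos hm]
    exact pv_A_nonpos ps m hm
  · rw [if_neg hm, Bool.eq_iff_iff, pv_A_iff, pv_scan_iff]
    simp only [pv_crossA_iff]
    constructor
    · rintro ⟨i, hi, ⟨hgate, hcr⟩ | ⟨j, hij, hj, hcr⟩⟩
      · exact ⟨i, hi, Or.inr (Or.inl ⟨by omega, hcr⟩)⟩
      · exact ⟨j, hj, Or.inr (Or.inr ⟨i, hij, hcr⟩)⟩
    · rintro ⟨j, hj, hmem | hself | ⟨i, hij, hcr⟩⟩
      · obtain ⟨w, _, hw⟩ := hmem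
        exact absurd hw (by simp [PySem.Set.empty])
      · exact ⟨j, hj, Or.inl ⟨by have := hself.1; omega, hself.2⟩⟩
      · exact ⟨i, by omega, Or.inr ⟨j, hij, hj, hcr⟩⟩

-- ===== VERDICT (by name: the statement is the Claim_ definition above) =====
theorem has_dimer_issues_spec : Claim_equal_has_dimer_issues := by
  intro primers m _
  unfold Spec_has_dimer_issues
  exact pv_main primers m
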